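-- pv_equiv track=rewrite | github.com/XPhyro/eternal_magic-bot | red-to-blue/red-to-blue.py | trigger_node
-- ===== SOURCE A (Python) =====
-- def trigger_node(mat, coord):
--     outer_size = len(mat)
--     inner_size = len(mat[0])
--
--     flat_mat = [j for i in mat for j in i]
--     coords_to_toggle = [coord, coord - inner_size, coord + inner_size]
--     if coord % inner_size != 0:
--         coords_to_toggle.append(coord - 1)
--     if coord % inner_size != inner_size - 1:
--         coords_to_toggle.append(coord + 1)
--
--     for i in coords_to_toggle:
--         if 0 <= i < outer_size * inner_size:
--             flat_mat[i] = not flat_mat[i]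
--     for i in range(outer_size):
--         for j in range(inner_size):
--             mat[i][j] = flat_mat[0]
--             del flat_mat[0]
--     return mat
-- ===== SOURCE B (Python) =====
-- def trigger_node(mat, coord):
--     # O(1) per toggle: toggle only the <=5 affected cells via row/col arithmetic
--     # (mutates mat in place, like the original, and returns it)
--     n = len(mat[0])
--     rows = len(mat)
--     r, c = divmod(coord, n)
--     cells = [(r, c), (r - 1, c), (r + 1, c)]
--     if c != 0:
--         cells.append((r, c - 1))
--     if c != n - 1:
--         cells.append((r, c + 1))
--     for i, j in cells:
--         if 0 <= i < rows:
--             mat[i][j] = not mat[i][j]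
--     return mat
-- ===== Notes on version B (the rewrite author's own statement) =====
-- stated objective: faster
-- what changed: Instead of flattening the whole grid, toggling flat indices and rebuilding every row, B computes (row,col) = divmod(coord, width) and toggles only the <=5 affected cells in place.
-- intended difference: On grids with a row longer than row 0 before the last row, A's flatten/rebuild shifts all later cells left (e.g. it returns [[False], [False, False], [True]] at the witness), while B toggles the intended grid neighbors of coord (returning [[False], [False, False], [False]]), which is the intended behavior. — e.g. on trigger_node([[false], [false, false], [true]], 3): A returns [[false], [false, false], [true]], B returns [[false], [false, false], [false]]
import Mathlib
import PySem

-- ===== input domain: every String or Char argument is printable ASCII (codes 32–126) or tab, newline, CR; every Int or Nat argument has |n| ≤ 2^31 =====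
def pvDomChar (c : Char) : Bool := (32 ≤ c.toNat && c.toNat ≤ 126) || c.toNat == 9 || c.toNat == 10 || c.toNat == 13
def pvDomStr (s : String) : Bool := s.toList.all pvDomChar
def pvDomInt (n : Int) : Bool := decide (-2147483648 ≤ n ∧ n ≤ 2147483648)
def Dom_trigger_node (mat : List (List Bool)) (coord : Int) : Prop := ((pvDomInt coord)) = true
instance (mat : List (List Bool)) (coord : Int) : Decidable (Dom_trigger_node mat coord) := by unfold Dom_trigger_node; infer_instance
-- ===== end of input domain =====

-- B toggles only the <=5 affected cells via divmod row/col arithmetic instead of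
-- flattening and rebuilding the whole grid (both mutate mat in place in Python;
-- the final state/return value is what is proved equal here).


-- ===== PORT A =====
-- flat_mat[i] = not flat_mat[i] guarded by 0 <= i < total (exactly A's loop body)
def pvToggleFlat (total : Int) (f : List Bool) (i : Int) : List Bool :=
  if 0 ≤ i ∧ i < total then f.set i.toNat (! f.getD i.toNat false) else f

-- the rebuild loop: each row gets the next inner_size flat cells (a longer row keeps its tail)
def pvRebuild : List (List Bool) → List Bool → Nat → List (List Bool)
  | [], _, _ => []
  | r :: rs, flat, inner => (flat.take inner ++ r.drop inner) :: pvRebuild rs (flat.drop inner) inner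

def trigger_node (mat : List (List Bool)) (coord : Int) : List (List Bool) :=
  let outer : Int := (mat.length : Int)
  let inner : Int := ((mat.headD []).length : Int)
  let flat := mat.flatten
  let cs1 := [coord, coord - inner, coord + inner]
  let cs2 := if PySem.Int.mod coord inner ≠ 0 then cs1 ++ [coord - 1] else cs1
  let cs3 := if PySem.Int.mod coord inner ≠ inner - 1 then cs2 ++ [coord + 1] else cs2
  let flat2 := cs3.foldl (pvToggleFlat (outer * inner)) flat
  pvRebuild mat flat2 (mat.headD []).length

-- ===== PORT B =====
def pvToggleRow (row : List Bool) (j : Nat) : List Bool := row.set j (! row.getD j false)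

-- mat[i][j] = not mat[i][j] guarded by 0 <= i < rows (exactly B's loop body)
def pvToggleCell (m : List (List Bool)) (rows : Int) (ij : Int × Int) : List (List Bool) :=
  if 0 ≤ ij.1 ∧ ij.1 < rows then m.set ij.1.toNat (pvToggleRow (m.getD ij.1.toNat []) ij.2.toNat) else m

def trigger_node_alt (mat : List (List Bool)) (coord : Int) : List (List Bool) :=
  let n : Int := ((mat.headD []).length : Int)
  let rows : Int := (mat.length : Int)
  let r := PySem.Int.floordiv coord n
  let c := PySem.Int.mod coord n
  let cells1 := [(r, c), (r - 1, c), (r + 1, c)]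
  let cells2 := if c ≠ 0 then cells1 ++ [(r, c - 1)] else cells1
  let cells3 := if c ≠ n - 1 then cells2 ++ [(r, c + 1)] else cells2
  cells3.foldl (fun m ij => pvToggleCell m rows ij) mat

-- ===== PRECONDITION & SPEC =====
-- Pre_ is exactly where the Python A returns normally: a non-empty grid, a non-empty
-- first row (else ZeroDivisionError on coord % inner_size), and no row shorter than the
-- first row (else IndexError while rebuilding).
def Pre_trigger_node (mat : List (List Bool)) (coord : Int) : Prop :=
  mat ≠ [] ∧ 0 < (mat.headD []).length ∧ ∀ row ∈ mat, (mat.headD []).length ≤ row.length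
instance (mat : List (List Bool)) (coord : Int) : Decidable (Pre_trigger_node mat coord) := by
  unfold Pre_trigger_node; infer_instance

def pvWitness_trigger_node : List (List Bool) × Int := ([[false, true], [true, false]], 1)

-- On grids with a row longer than row 0 before the last row, A's flatten/rebuild shifts
-- all later cells left so it returns a grid with cells moved across rows and toggles
-- landing on the wrong cells, while B toggles the intended neighbors of coord — the
-- intended behavior for a grid-toggle function.
def D_trigger_node (mat : List (List Bool)) (coord : Int) : Prop :=
  ∃ row ∈ mat.dropLast, (mat.headD []).length < row.length
instance (mat : List (List Bool)) (coord : Int) : Decidable (D_trigger_node mat coord) := by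
  unfold D_trigger_node; infer_instance

def Spec_trigger_node (mat : List (List Bool)) (coord : Int) (out : List (List Bool)) : Prop :=
  ¬ D_trigger_node mat coord → out = trigger_node_alt mat coord
instance (mat : List (List Bool)) (coord : Int) (out : List (List Bool)) : Decidable (Spec_trigger_node mat coord out) := by unfold Spec_trigger_node; infer_instance

def pvDiffWitness_trigger_node : List (List Bool) × Int := ([[false], [false, false], [true]], 3)
def pvDiffWitnessOut_trigger_node : (List (List Bool)) × (List (List Bool)) :=
  ([[false], [false, false], [true]], [[false], [false, false], [false]])

-- ===== CLAIM (what is proved, stated in full; the proofs are below) =====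
def Claim_unchanged_trigger_node : Prop := ∀ (mat : List (List Bool)) (coord : Int), Dom_trigger_node mat coord → Pre_trigger_node mat coord → Spec_trigger_node mat coord (trigger_node mat coord)
def Claim_changed_trigger_node : Prop := Dom_trigger_node (pvDiffWitness_trigger_node.1) (pvDiffWitness_trigger_node.2) ∧ Pre_trigger_node (pvDiffWitness_trigger_node.1) (pvDiffWitness_trigger_node.2) ∧ D_trigger_node (pvDiffWitness_trigger_node.1) (pvDiffWitness_trigger_node.2) ∧ trigger_node (pvDiffWitness_trigger_node.1) (pvDiffWitness_trigger_node.2) = pvDiffWitnessOut_trigger_node.1 ∧ trigger_node_alt (pvDiffWitness_trigger_node.1) (pvDiffWitness_trigger_node.2) = pvDiffWitnessOut_trigger_node.2 ∧ pvDiffWitnessOut_trigger_node.1 ≠ pvDiffWitnessOut_trigger_node.2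

-- ===== LEMMAS AND PROOFS =====

-- every row except possibly the last has length exactly n, and no row is shorter
def pvOk (rs : List (List Bool)) (n : Nat) : Prop :=
  (∀ r ∈ rs.dropLast, r.length = n) ∧ (∀ r ∈ rs, n ≤ r.length)

theorem pvOk_cons (r r2 : List Bool) (rs : List (List Bool)) (n : Nat)
    (h : pvOk (r :: r2 :: rs) n) : r.length = n ∧ pvOk (r2 :: rs) n := by
  obtain ⟨h1, h2⟩ := h
  rw [List.dropLast_cons₂] at h1
  exact ⟨h1 r (by simp),
    ⟨fun x hx => h1 x (List.mem_cons_of_mem _ hx),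
     fun x hx => h2 x (List.mem_cons_of_mem _ hx)⟩⟩

theorem pvToggleFlat_length (total : Int) (f : List Bool) (i : Int) :
    (pvToggleFlat total f i).length = f.length := by
  unfold pvToggleFlat; split <;> simp

theorem pvGetD_take (l : List Bool) (n i : Nat) (h : i < n) :
    (l.take n).getD i false = l.getD i false := by
  simp [List.getD_eq_getElem?_getD, h]

theorem pvGetD_drop (l : List Bool) (n i : Nat) :
    (l.drop n).getD i false = l.getD (n + i) false := by
  simp [List.getD_eq_getElem?_getD, List.getElem?_drop]

theorem pvGetD_append (a b : List Bool) (i : Nat) (h : i < a.length) :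
    (a ++ b).getD i false = a.getD i false := by
  simp [List.getD_eq_getElem?_getD, List.getElem?_append_left h]

theorem pvSet_append (a b : List Bool) (i : Nat) (x : Bool) (h : i < a.length) :
    (a ++ b).set i x = a.set i x ++ b := by
  rw [List.set_append]
  simp [h]

theorem pvFlattenLen (mat : List (List Bool)) (n : Nat)
    (h : ∀ r ∈ mat, n ≤ r.length) : mat.length * n ≤ mat.flatten.length := by
  induction mat with
  | nil => simp
  | cons r rs ih =>
    simp only [List.flatten_cons, List.length_append, List.length_cons, Nat.succ_mul]
    have h1 : n ≤ r.length := h r (by simp)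
    have h2 := ih (fun x hx => h x (List.mem_cons_of_mem _ hx))
    omega

theorem pvRebuild_flatten (mat : List (List Bool)) (n : Nat)
    (hOk : pvOk mat n) : pvRebuild mat mat.flatten n = mat := by
  induction mat with
  | nil => rfl
  | cons r rs ih =>
    cases rs with
    | nil => simp [pvRebuild, List.take_append_drop]
    | cons r2 rs2 =>
      obtain ⟨hr, hOk2⟩ := pvOk_cons r r2 rs2 n hOk
      have hdr : r.drop n = [] := by simp [List.drop_eq_nil_iff, hr]
      rw [List.flatten_cons,
        show pvRebuild (r :: r2 :: rs2) (r ++ (r2 :: rs2).flatten) n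
          = (List.take n (r ++ (r2 :: rs2).flatten) ++ r.drop n)
            :: pvRebuild (r2 :: rs2) (List.drop n (r ++ (r2 :: rs2).flatten)) n from rfl,
        List.take_left' hr, List.drop_left' hr, hdr, List.append_nil, ih hOk2]

theorem pvRebuild_set (n : Nat) (rs : List (List Bool)) (flat : List Bool) (q c : Nat)
    (hOk : pvOk rs n) (hlen : rs.length * n ≤ flat.length)
    (hc : c < n) (hq : q < rs.length) :
    pvRebuild rs (flat.set (q * n + c) (! flat.getD (q * n + c) false)) n
      = (pvRebuild rs flat n).set q (pvToggleRow ((pvRebuild rs flat n).getD q []) c) := by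
  induction rs generalizing flat q with
  | nil => simp at hq
  | cons r rs ih =>
    have hnflat : n ≤ flat.length := by
      have : n ≤ (rs.length + 1) * n := by
        rw [Nat.succ_mul]; omega
      simpa using le_trans this hlen
    have htklen : (flat.take n).length = n := by
      rw [List.length_take]; omega
    cases q with
    | zero =>
      simp only [Nat.zero_mul, Nat.zero_add, pvRebuild,
        List.set_cons_zero, List.getD_cons_zero, pvToggleRow]
      rw [List.take_set, List.drop_set_of_lt hc,
        pvSet_append _ _ c _ (by omega), pvGetD_append _ _ c (by omega),
        pvGetD_take flat n c hc]
    | succ q =>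
      have hidx : (q + 1) * n + c = n + (q * n + c) := by ring
      rw [hidx, ← pvGetD_drop]
      simp only [pvRebuild, List.set_cons_succ, List.getD_cons_succ]
      rw [← List.set_drop]
      have htake : List.take n (flat.set (n + (q * n + c))
          (!(flat.drop n).getD (q * n + c) false)) = flat.take n := by
        rw [List.take_set]
        exact List.set_eq_of_length_le (by rw [List.length_take]; omega)
      rw [htake]
      congr 1
      have hOk2 : pvOk rs n := by
        cases rs with
        | nil => simp at hq
        | cons r2 rs2 => exact (pvOk_cons r r2 rs2 n hOk).2
      have hlen2 : rs.length * n ≤ (flat.drop n).length := by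
        rw [List.length_drop]
        have : rs.length * n + n ≤ flat.length := by
          rw [← Nat.succ_mul]; simpa using hlen
        omega
      exact ih (flat.drop n) q hOk2 hlen2 (by simpa using hq)

theorem pvDivmodUnique (a qq cc : Int) (n : Nat) (hn : (0 : Int) < (n : Int))
    (h : a = qq * (n : Int) + cc) (h0 : 0 ≤ cc) (h1 : cc < (n : Int)) :
    PySem.Int.floordiv a (n : Int) = qq ∧ PySem.Int.mod a (n : Int) = cc := by
  have hq : PySem.Int.floordiv a (n : Int) = qq := by
    rw [PySem.Int.floordiv_eq_iff_of_pos hn]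
    constructor <;> nlinarith
  refine ⟨hq, ?_⟩
  have hm := PySem.Int.floordiv_mul_add_mod a (n : Int)
  rw [hq] at hm
  linarith

theorem pvStep (mat : List (List Bool)) (flat : List Bool) (t : Int) (n : Nat) (hn : 0 < n)
    (hOk : pvOk mat n) (hlen : mat.length * n ≤ flat.length) :
    pvRebuild mat (pvToggleFlat ((mat.length : Int) * (n : Int)) flat t) n
      = pvToggleCell (pvRebuild mat flat n) (mat.length : Int)
          (PySem.Int.floordiv t (n : Int), PySem.Int.mod t (n : Int)) := by
  have hnz : (0 : Int) < (n : Int) := by exact_mod_cast hn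
  have hc0 : 0 ≤ PySem.Int.mod t (n : Int) := PySem.Int.mod_nonneg t hnz
  have hcn : PySem.Int.mod t (n : Int) < (n : Int) := PySem.Int.mod_lt t hnz
  have ht : PySem.Int.floordiv t (n : Int) * (n : Int) + PySem.Int.mod t (n : Int) = t :=
    PySem.Int.floordiv_mul_add_mod t (n : Int)
  set q := PySem.Int.floordiv t (n : Int) with hqdef
  set c := PySem.Int.mod t (n : Int) with hcdef
  have hguard : (0 ≤ t ∧ t < (mat.length : Int) * (n : Int))
      ↔ (0 ≤ q ∧ q < (mat.length : Int)) := by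
    constructor
    · rintro ⟨h1, h2⟩
      constructor
      · by_contra hneg
        push Not at hneg
        have : q * (n : Int) ≤ (-1) * (n : Int) :=
          mul_le_mul_of_nonneg_right (by omega) (le_of_lt hnz)
        linarith
      · by_contra hneg
        push Not at hneg
        have : (mat.length : Int) * (n : Int) ≤ q * (n : Int) :=
          mul_le_mul_of_nonneg_right hneg (le_of_lt hnz)
        linarith
    · rintro ⟨h1, h2⟩
      constructor
      · have : (0 : Int) ≤ q * (n : Int) := mul_nonneg h1 (le_of_lt hnz)
        linarith
      · have h3 : q * (n : Int) ≤ ((mat.length : Int) - 1) * (n : Int) :=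
          mul_le_mul_of_nonneg_right (by omega) (le_of_lt hnz)
        have h4 : ((mat.length : Int) - 1) * (n : Int)
            = (mat.length : Int) * (n : Int) - (n : Int) := by ring
        linarith
  by_cases hg : 0 ≤ t ∧ t < (mat.length : Int) * (n : Int)
  · have hg' := hguard.mp hg
    have htn : t.toNat = q.toNat * n + c.toNat := by
      have h1 : ((q.toNat * n + c.toNat : Nat) : Int) = t := by
        push_cast [Int.toNat_of_nonneg hg'.1, Int.toNat_of_nonneg hc0]
        linarith
      omega
    simp only [pvToggleFlat, pvToggleCell, hg.1, hg.2, hg'.1, hg'.2, and_self, if_true]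
    rw [htn]
    exact pvRebuild_set n mat flat q.toNat c.toNat hOk hlen (by omega) (by omega)
  · have hg' : ¬(0 ≤ q ∧ q < (mat.length : Int)) := fun h => hg (hguard.mpr h)
    simp only [pvToggleFlat, pvToggleCell, if_neg hg, if_neg hg']

theorem pvFold (mat : List (List Bool)) (n : Nat) (hn : 0 < n)
    (hOk : pvOk mat n) (ts : List Int) (flat : List Bool)
    (hlen : mat.length * n ≤ flat.length) :
    pvRebuild mat (ts.foldl (pvToggleFlat ((mat.length : Int) * (n : Int))) flat) n
      = ts.foldl (fun M t => pvToggleCell M (mat.length : Int)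
          (PySem.Int.floordiv t (n : Int), PySem.Int.mod t (n : Int)))
          (pvRebuild mat flat n) := by
  induction ts generalizing flat with
  | nil => rfl
  | cons t ts ih =>
    simp only [List.foldl_cons]
    rw [ih _ (by rw [pvToggleFlat_length]; exact hlen), pvStep mat flat t n hn hOk hlen]

-- ===== VERDICT (by name: the statement is the Claim_ definition above) =====
theorem trigger_node_spec : Claim_unchanged_trigger_node := by
  intro mat coord _ hpre
  obtain ⟨hne, hnpos, hge⟩ := hpre
  unfold Spec_trigger_node
  intro hnd
  simp only [trigger_node, trigger_node_alt]
  set n : Nat := (mat.headD []).length with hndef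
  have hOk : pvOk mat n := by
    refine ⟨fun r hr => ?_, hge⟩
    have h1 : n ≤ r.length := hge r (List.dropLast_subset _ hr)
    have h2 : ¬ n < r.length := fun hlt => hnd ⟨r, hr, hlt⟩
    omega
  have hnz : (0 : Int) < (n : Int) := by exact_mod_cast hnpos
  have hc0 : 0 ≤ PySem.Int.mod coord (n : Int) := PySem.Int.mod_nonneg coord hnz
  have hcn : PySem.Int.mod coord (n : Int) < (n : Int) := PySem.Int.mod_lt coord hnz
  have hco : PySem.Int.floordiv coord (n : Int) * (n : Int) + PySem.Int.mod coord (n : Int)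
      = coord := PySem.Int.floordiv_mul_add_mod coord (n : Int)
  set q := PySem.Int.floordiv coord (n : Int) with hqdef
  set c := PySem.Int.mod coord (n : Int) with hcdef
  have hflen : mat.length * n ≤ mat.flatten.length := pvFlattenLen mat n hge
  rw [pvFold mat n hnpos hOk _ mat.flatten hflen, pvRebuild_flatten mat n hOk]
  have e2 := pvDivmodUnique (coord - (n : Int)) (q - 1) c n hnz (by rw [← hco]; ring) hc0 hcn
  have e3 := pvDivmodUnique (coord + (n : Int)) (q + 1) c n hnz (by rw [← hco]; ring) hc0 hcn
  split_ifs with h1 h2 h2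
  · have e4 := pvDivmodUnique (coord - 1) q (c - 1) n hnz (by rw [← hco]; ring)
      (by omega) (by omega)
    have e5 := pvDivmodUnique (coord + 1) q (c + 1) n hnz (by rw [← hco]; ring)
      (by omega) (by omega)
    simp only [List.cons_append, List.nil_append, List.foldl_cons, List.foldl_nil,
      e2.1, e2.2, e3.1, e3.2, e4.1, e4.2, e5.1, e5.2, ← hqdef, ← hcdef]
  · have e5 := pvDivmodUnique (coord + 1) q (c + 1) n hnz (by rw [← hco]; ring)
      (by omega) (by omega)
    simp only [List.cons_append, List.nil_append, List.foldl_cons, List.foldl_nil,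
      e2.1, e2.2, e3.1, e3.2, e5.1, e5.2, ← hqdef, ← hcdef]
  · have e4 := pvDivmodUnique (coord - 1) q (c - 1) n hnz (by rw [← hco]; ring)
      (by omega) (by omega)
    simp only [List.cons_append, List.nil_append, List.foldl_cons, List.foldl_nil,
      e2.1, e2.2, e3.1, e3.2, e4.1, e4.2, ← hqdef, ← hcdef]
  · simp only [List.foldl_cons, List.foldl_nil,
      e2.1, e2.2, e3.1, e3.2, ← hqdef, ← hcdef]

theorem trigger_node_changed : Claim_changed_trigger_node := by
  unfold Claim_changed_trigger_node; decide
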